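-- pv_equiv track=rewrite | github.com/Saurabh4626/dsa | two_dimensional_list/Largest_column_sum.py | largest_column_sum
-- ===== SOURCE A (Python) =====
-- def largest_column_sum(list):
--     rows=len(list)
--     column=len(list[0])
--     maxsum=-1
--     max_column_index=-1
--     for j in range(column):
--         sum=0
--         for i in range(rows):
--             sum+=list[i][j]
--         if sum>maxsum:
--             maxsum=sum
--             max_column_index=j
--     return maxsum,max_column_index
-- ===== SOURCE B (Python) =====
-- def largest_column_sum(list):
--     cols = len(list[0])
--     sums = [0] * cols
--     for row in list:
--         sums = [s + x for s, x in zip(sums, row)]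
--     maxsum = -1
--     max_column_index = -1
--     for j, s in enumerate(sums):
--         if s > maxsum:
--             maxsum = s
--             max_column_index = j
--     return maxsum, max_column_index
-- ===== Notes on version B (the rewrite author's own statement) =====
-- stated objective: alternative
-- what changed: A scans each column separately with a nested column-major loop carrying a running max; B builds all column sums in one row-major pass (pointwise zip-accumulation over rows) and then takes the first strict argmax of the sums table in a separate enumerate scan. The single row-major pass traverses each row contiguously (cache-friendly) instead of A's column-major strided access.
import Mathlib
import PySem

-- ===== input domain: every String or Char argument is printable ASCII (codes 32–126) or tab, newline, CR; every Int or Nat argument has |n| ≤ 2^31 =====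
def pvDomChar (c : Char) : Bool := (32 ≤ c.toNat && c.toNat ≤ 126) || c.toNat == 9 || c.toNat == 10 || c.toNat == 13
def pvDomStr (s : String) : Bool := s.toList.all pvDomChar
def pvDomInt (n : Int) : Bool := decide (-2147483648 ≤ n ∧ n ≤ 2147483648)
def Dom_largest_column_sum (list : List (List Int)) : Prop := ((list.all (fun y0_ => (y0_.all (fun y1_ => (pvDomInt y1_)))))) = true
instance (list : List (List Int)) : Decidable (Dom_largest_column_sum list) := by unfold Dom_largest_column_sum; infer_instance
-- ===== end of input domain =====

-- B replaces A's column-major scan-with-running-max by a row-major accumulation of all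
-- column sums followed by a separate first-strict-argmax scan (objective: alternative decomposition).
-- ===== PORT A =====
def largest_column_sum (list : List (List Int)) : Int × Int :=
  let rows : Int := (list.length : Int)
  let column : Int := ((PySem.List.pyGetD list 0 []).length : Int)
  (PySem.List.pyRange 0 column 1).foldl
    (fun st j =>
      let sum : Int := (PySem.List.pyRange 0 rows 1).foldl
        (fun s i => s + PySem.List.pyGetD (PySem.List.pyGetD list i []) j 0) 0
      if sum > st.1 then (sum, j) else st)
    (-1, -1)

-- ===== PORT B =====
def largest_column_sum_alt (list : List (List Int)) : Int × Int :=
  let cols : Nat := (PySem.List.pyGetD list 0 []).length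
  let sums : List Int := list.foldl (fun sums row => List.zipWith (· + ·) sums row) (List.replicate cols 0)
  (PySem.List.enumerate sums).foldl
    (fun st p => if p.2 > st.1 then (p.2, p.1) else st)
    (-1, -1)

-- ===== PRECONDITION & SPEC =====
-- Pre_ excludes exactly the inputs on which A raises IndexError: the empty list (list[0])
-- and ragged inputs with some row shorter than row 0 (list[i][j]).
def Pre_largest_column_sum (list : List (List Int)) : Prop :=
  list ≠ [] ∧ ∀ r ∈ list, (list.headD []).length ≤ r.length
instance (list : List (List Int)) : Decidable (Pre_largest_column_sum list) := by
  unfold Pre_largest_column_sum; infer_instance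
def pvWitness_largest_column_sum : List (List Int) := [[1, 2], [3, 4]]
def Spec_largest_column_sum (list : List (List Int)) (out : Int × Int) : Prop := out = largest_column_sum_alt list
instance (list : List (List Int)) (out : Int × Int) : Decidable (Spec_largest_column_sum list out) := by unfold Spec_largest_column_sum; infer_instance

-- ===== CLAIM (what is proved, stated in full; the proofs are below) =====
def Claim_equal_largest_column_sum : Prop := ∀ (list : List (List Int)), Dom_largest_column_sum list → Pre_largest_column_sum list → Spec_largest_column_sum list (largest_column_sum list)

-- ===== LEMMAS AND PROOFS =====

-- the sum of column k over all rows (rows shorter than k+1 contribute 0)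
def pvColSum (list : List (List Int)) (k : Nat) : Int :=
  (list.map (fun r => r.getD k 0)).sum

-- the common canonical form both folds reduce to: first strict argmax over column sums
def pvCanon (list : List (List Int)) (cols : Nat) : Int × Int :=
  (List.range cols).foldl
    (fun st k => if pvColSum list k > st.1 then (pvColSum list k, (k : Int)) else st)
    (-1, -1)

lemma pv_sums_eq : ∀ (L : List (List Int)) (acc : List Int), (∀ r ∈ L, acc.length ≤ r.length) →
    L.foldl (fun s r => List.zipWith (· + ·) s r) acc =
    (List.range acc.length).map (fun j => acc.getD j 0 + pvColSum L j) := by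
  intro L
  induction L with
  | nil =>
    intro acc _
    simp only [List.foldl_nil, pvColSum, List.map_nil, List.sum_nil, add_zero]
    apply List.ext_getElem (by simp)
    intro i h1 h2
    simp [List.getElem?_eq_getElem h1]
  | cons r L ih =>
    intro acc h
    have hr : acc.length ≤ r.length := h r (List.mem_cons_self ..)
    have hlacc : (List.zipWith (· + ·) acc r).length = acc.length := by
      simp [List.length_zipWith]; omega
    simp only [List.foldl_cons]
    rw [ih (List.zipWith (· + ·) acc r) (by intro r' hr'; rw [hlacc]; exact h r' (List.mem_cons_of_mem _ hr'))]
    rw [hlacc]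
    apply List.map_congr_left
    intro j hj
    have hjl : j < acc.length := List.mem_range.mp hj
    rw [List.getD_eq_getElem _ _ (by omega : j < (List.zipWith (· + ·) acc r).length)]
    rw [List.getElem_zipWith]
    rw [List.getD_eq_getElem _ _ hjl]
    simp only [pvColSum, List.map_cons, List.sum_cons]
    rw [List.getD_eq_getElem _ _ (by omega : j < r.length)]
    ring

lemma pv_A_eq_canon (list : List (List Int)) (hne : list ≠ []) :
    largest_column_sum list = pvCanon list (list.headD []).length := by
  have hget0 : PySem.List.pyGetD list 0 [] = list.headD [] := by
    cases list with
    | nil => exact absurd rfl hne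
    | cons a l => simp [PySem.List.pyGetD_zero_cons]
  unfold largest_column_sum pvCanon
  simp only [hget0]
  rw [PySem.List.pyRange_one 0 (((list.headD []).length : Int)), List.foldl_map]
  simp only [sub_zero, Int.toNat_natCast]
  apply PySem.List.foldl_congr_mem
  intro st k _
  have hsum : (PySem.List.pyRange 0 (list.length : Int) 1).foldl
      (fun s i => s + PySem.List.pyGetD (PySem.List.pyGetD list i []) ((k : Int)) 0) 0
      = pvColSum list k := by
    rw [PySem.List.foldl_pyRange_zero_pyGetD' list []
      (fun s row => s + PySem.List.pyGetD row ((k : Int)) 0) 0]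
    rw [PySem.List.foldl_add]
    simp [pvColSum, PySem.List.pyGetD_natCast]
  simp only [zero_add]
  rw [hsum]

lemma pv_B_eq_canon (list : List (List Int)) (hne : list ≠ [])
    (hlen : ∀ r ∈ list, (list.headD []).length ≤ r.length) :
    largest_column_sum_alt list = pvCanon list (list.headD []).length := by
  have hget0 : PySem.List.pyGetD list 0 [] = list.headD [] := by
    cases list with
    | nil => exact absurd rfl hne
    | cons a l => simp [PySem.List.pyGetD_zero_cons]
  unfold largest_column_sum_alt pvCanon
  simp only [hget0]
  rw [pv_sums_eq list (List.replicate (list.headD []).length 0)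
    (by intro r hr; simpa using hlen r hr)]
  have hrep : ∀ j : Nat, (List.replicate (list.headD []).length (0 : Int)).getD j 0 = 0 := by
    intro j
    simp only [List.getD, List.getElem?_replicate]
    split <;> rfl
  simp only [List.length_replicate, hrep, zero_add]
  rw [PySem.List.enumerate_eq_map_pyRange
    (List.map (fun j => pvColSum list j) (List.range (list.headD []).length)) 0]
  rw [List.foldl_map]
  simp only [PySem.List.len_eq, List.length_map, List.length_range]
  rw [PySem.List.pyRange_one, List.foldl_map]
  simp only [sub_zero, Int.toNat_natCast]
  apply PySem.List.foldl_congr_mem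
  intro st k hk
  have hkl : k < (list.headD []).length := List.mem_range.mp hk
  have hgd : PySem.List.pyGetD ((List.range (list.headD []).length).map (fun j => pvColSum list j))
      ((k : Int)) 0 = pvColSum list k := by
    simp only [PySem.List.pyGetD_natCast]
    rw [List.getD_eq_getElem _ _ (by simpa using hkl)]
    simp
  simp only [zero_add]
  rw [hgd]

-- ===== VERDICT (by name: the statement is the Claim_ definition above) =====
theorem largest_column_sum_spec : Claim_equal_largest_column_sum := by
  intro list _ hpre
  unfold Spec_largest_column_sum
  rw [pv_A_eq_canon list hpre.1, pv_B_eq_canon list hpre.1 hpre.2]
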